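-- pv_equiv track=rewrite | github.com/night199uk/edk2-gdb-server | script/py/ShowEfiDevicePath.py | UnicodeBytesToString
-- ===== SOURCE A (Python) =====
-- def UnicodeBytesToString(Bytes):
--     Str = ""
--     for I in range(0, len(Bytes), 2):
--         if Bytes[I] == 0:
--             return (Str, Bytes[I + 2 :])
--         else:
--             Str += chr(Bytes[I])
--     return None
-- ===== SOURCE B (Python) =====
-- def UnicodeBytesToString(Bytes):
--     even = Bytes[::2]
--     try:
--         pos = even.index(0)
--     except ValueError:
--         return None
--     return ("".join(chr(c) for c in even[:pos]), Bytes[2 * pos + 2:])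
-- ===== Notes on version B (the rewrite author's own statement) =====
-- stated objective: idiomatic
-- what changed: A's single accumulate-and-test loop over range(0,len,2) is replaced by a slice-then-locate-then-build decomposition: slice out the even bytes once, find the first null with .index, then build the string with ''.join(chr(c) ...) over the prefix.
-- outside the precondition, e.g. on UnicodeBytesToString([55296]): A returns None, B returns None; on UnicodeBytesToString([-1]): A raises ValueError, B returns None
import Mathlib
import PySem

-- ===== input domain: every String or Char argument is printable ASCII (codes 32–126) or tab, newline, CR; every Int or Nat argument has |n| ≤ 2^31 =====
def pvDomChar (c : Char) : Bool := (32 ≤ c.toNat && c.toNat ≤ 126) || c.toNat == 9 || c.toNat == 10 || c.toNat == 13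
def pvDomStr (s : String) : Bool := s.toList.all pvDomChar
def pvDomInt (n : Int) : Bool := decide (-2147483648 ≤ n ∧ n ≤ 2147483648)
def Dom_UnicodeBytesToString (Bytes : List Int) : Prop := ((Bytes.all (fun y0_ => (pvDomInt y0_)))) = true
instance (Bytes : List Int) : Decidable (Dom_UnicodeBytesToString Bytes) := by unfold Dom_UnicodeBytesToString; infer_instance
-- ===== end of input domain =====

-- B replaces A's accumulate-and-test loop by: slice out the even bytes once, locate the
-- first null with .index, then build the string by join-of-chr over the prefix (idiomatic).

-- ===== PORT A =====
-- the for-I-in-range(0, len, 2) loop of A, as recursion on the index I (step 2)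
def pvALoop (Bytes : List Int) (Str : List Char) (I : Nat) : Option (String × List Int) :=
  if h : I < Bytes.length then
    if Bytes[I] = 0 then some (String.ofList Str, Bytes.drop (I + 2))     -- Bytes[I+2:] (I+2 >= 0)
    else pvALoop Bytes (Str ++ [Char.ofNat (Bytes[I]).toNat]) (I + 2)    -- Str += chr(Bytes[I]) (exact on Pre_)
  else none
termination_by Bytes.length - I

def UnicodeBytesToString (Bytes : List Int) : Option (String × List Int) :=
  pvALoop Bytes [] 0

-- ===== PORT B =====
-- Bytes[::2] (start/stop omitted, step 2): exact hand port
def pvEvens : List Int → List Int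
  | [] => []
  | [x] => [x]
  | x :: _ :: rest => x :: pvEvens rest

def UnicodeBytesToString_alt (Bytes : List Int) : Option (String × List Int) :=
  let even := pvEvens Bytes
  match PySem.List.index? even 0 with
  | none => none
  | some pos =>
      some (String.ofList (((even.take pos)).map (fun c => Char.ofNat c.toNat)),  -- ''.join(chr(c) for c in even[:pos])
            Bytes.drop (2 * pos + 2))                                             -- Bytes[2*pos+2:] (nonneg index)

-- ===== PRECONDITION & SPEC =====
-- Pre_ excludes inputs on which A does not return a Lean-representable value: even-index
-- bytes before the first even-index null that are < 1 or > 0x10FFFF (Python's chr raises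
-- ValueError there), and those in the surrogate range 0xD800-0xDFFF, where chr returns a
-- lone surrogate — not a Unicode scalar value, so the string has no Lean representation.
def Pre_UnicodeBytesToString (Bytes : List Int) : Prop :=
  ∀ i : Fin Bytes.length, i.val % 2 = 0 →
    (∀ j : Fin Bytes.length, j.val < i.val → j.val % 2 = 0 → Bytes[j] ≠ 0) →
    Bytes[i] = 0 ∨ (1 ≤ Bytes[i] ∧ Bytes[i] ≤ 1114111 ∧ ¬(55296 ≤ Bytes[i] ∧ Bytes[i] ≤ 57343))
instance (Bytes : List Int) : Decidable (Pre_UnicodeBytesToString Bytes) := by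
  unfold Pre_UnicodeBytesToString; infer_instance

def pvWitness_UnicodeBytesToString : List Int := [72, 0, 57344, 0, 0, 0, 33]

def Spec_UnicodeBytesToString (Bytes : List Int) (out : Option (String × List Int)) : Prop := out = UnicodeBytesToString_alt Bytes
instance (Bytes : List Int) (out : Option (String × List Int)) : Decidable (Spec_UnicodeBytesToString Bytes out) := by unfold Spec_UnicodeBytesToString; infer_instance

-- ===== CLAIM (what is proved, stated in full; the proofs are below) =====
def Claim_equal_UnicodeBytesToString : Prop := ∀ (Bytes : List Int), Dom_UnicodeBytesToString Bytes → Pre_UnicodeBytesToString Bytes → Spec_UnicodeBytesToString Bytes (UnicodeBytesToString Bytes)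

-- ===== LEMMAS AND PROOFS =====

-- stepping the index of A's loop past two leading bytes
theorem pvALoop_shift (x y : Int) (l : List Int) :
    ∀ (k : Nat) (Str : List Char) (I : Nat), k = l.length - I →
      pvALoop (x :: y :: l) Str (I + 2) = pvALoop l Str I := by
  intro k
  induction k using Nat.strong_induction_on with
  | _ k ih =>
    intro Str I hk
    rw [pvALoop, pvALoop]
    by_cases h : I < l.length
    · rw [dif_pos (by simp only [List.length_cons]; omega), dif_pos h]
      simp only [List.getElem_cons_succ]
      by_cases hb : l[I] = 0
      · rw [if_pos hb, if_pos hb]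
        simp [List.drop_succ_cons]
      · rw [if_neg hb, if_neg hb]
        exact ih (l.length - (I + 2)) (by omega) _ (I + 2) rfl
    · rw [dif_neg (by simp only [List.length_cons]; omega), dif_neg h]

-- A's loop, started with accumulator Str, equals B's locate-then-build decomposition
theorem pvALoop_eq (l : List Int) : ∀ (Str : List Char),
    pvALoop l Str 0 =
      match PySem.List.index? (pvEvens l) 0 with
      | none => none
      | some pos =>
          some (String.ofList (Str ++ ((pvEvens l).take pos).map (fun c => Char.ofNat c.toNat)),
                l.drop (2 * pos + 2)) := by
  induction l using pvEvens.induct with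
  | case1 =>
      intro Str
      rw [pvALoop]
      simp [pvEvens, PySem.List.index?_eq_idxOf?]
  | case2 x =>
      intro Str
      rw [show pvEvens [x] = [x] from rfl]
      rw [pvALoop]
      by_cases hx : x = 0
      · subst hx
        rw [PySem.List.index?_cons_self]
        simp
      · rw [dif_pos (by simp)]
        simp only [List.getElem_cons_zero]
        rw [if_neg hx, pvALoop]
        rw [dif_neg (by simp)]
        rw [PySem.List.index?_cons_of_ne _ hx]
        simp [PySem.List.index?_eq_idxOf?]
  | case3 x y rest ih =>
      intro Str
      rw [show pvEvens (x :: y :: rest) = x :: pvEvens rest from rfl]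
      rw [pvALoop]
      by_cases hx : x = 0
      · subst hx
        rw [PySem.List.index?_cons_self]
        simp
      · rw [dif_pos (by simp only [List.length_cons]; omega)]
        simp only [List.getElem_cons_zero]
        rw [if_neg hx]
        rw [show (0 : Nat) + 2 = 0 + 2 from rfl, pvALoop_shift x y rest rest.length _ 0 (by omega), ih]
        rw [PySem.List.index?_cons_of_ne _ hx]
        cases hidx : PySem.List.index? (pvEvens rest) 0 with
        | none => simp
        | some pos =>
            simp only [Option.map_some]
            have harith : 2 * (pos + 1) + 2 = 2 * pos + 2 + 2 := by omega
            simp [List.take_succ_cons, harith]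

-- ===== VERDICT (by name: the statement is the Claim_ definition above) =====
theorem UnicodeBytesToString_spec : Claim_equal_UnicodeBytesToString := by
  intro Bytes _ _
  unfold Spec_UnicodeBytesToString UnicodeBytesToString UnicodeBytesToString_alt
  rw [pvALoop_eq Bytes []]
  simp only [List.nil_append]
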